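-- pv_equiv track=rewrite | github.com/mit3r/matura | czerw2022/koduj.py | KodujWyw
-- ===== SOURCE A (Python) =====
-- def KodujWyw(n, wyw):
--
--     if n == 1:
--         return ''
--     else:
--         wyw[0] += 1
--         k = n // 2
--         if k % 2 == 0:
--             return KodujWyw(k, wyw) + 'A'
--         else:
--             return 'B' + KodujWyw(k, wyw)
-- ===== SOURCE B (Python) =====
-- def KodujWyw(n, wyw):
--     ks = []
--     while n != 1:
--         wyw[0] += 1
--         n //= 2
--         ks.append(n)
--     return 'B' * sum(1 for k in ks if k % 2 != 0) + 'A' * sum(1 for k in ks if k % 2 == 0)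
-- ===== Notes on version B (the rewrite author's own statement) =====
-- stated objective: alternative
-- what changed: Instead of building the string inside-out around a recursive call, B first collects the list of successive halvings, observes that every odd halving contributes a 'B' on the left and every even one an 'A' on the right, and returns 'B'*#odd + 'A'*#even by string multiplication over the collected list.
import Mathlib
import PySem

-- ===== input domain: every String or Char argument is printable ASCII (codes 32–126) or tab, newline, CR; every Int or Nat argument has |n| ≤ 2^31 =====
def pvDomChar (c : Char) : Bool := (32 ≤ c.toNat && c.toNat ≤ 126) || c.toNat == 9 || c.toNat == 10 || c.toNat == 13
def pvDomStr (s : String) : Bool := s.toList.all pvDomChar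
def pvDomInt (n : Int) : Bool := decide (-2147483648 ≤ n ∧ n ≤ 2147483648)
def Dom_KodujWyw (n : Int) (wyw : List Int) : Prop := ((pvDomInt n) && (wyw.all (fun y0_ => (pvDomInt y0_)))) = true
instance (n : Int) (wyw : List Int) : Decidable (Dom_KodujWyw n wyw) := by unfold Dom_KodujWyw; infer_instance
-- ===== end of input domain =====

-- B collects the list of halvings first and returns 'B'*#odd + 'A'*#even by string
-- multiplication (equivalence is about the RETURN value; both Pythons leave wyw[0]
-- increased by the same step count, which the ports do not model since wyw is not returned).

-- ===== PORT A =====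
-- A's recursion on n; fuel n.toNat is a pure totalization guard: for every n ≥ 1
-- (the only inputs where Python returns) it never runs out, since n.toNat strictly
-- decreases at each halving step and the recursion stops at 1.
def kodujRecA : Nat → Int → String
  | 0, _ => ""
  | fuel + 1, n =>
    if n == 1 then ""
    else
      let k := PySem.Int.floordiv n 2
      if PySem.Int.mod k 2 == 0 then
        kodujRecA fuel k ++ "A"
      else
        "B" ++ kodujRecA fuel k

def KodujWyw (n : Int) (wyw : List Int) : String := kodujRecA n.toNat n

-- ===== PORT B =====
-- the while-loop that collects the successive halvings ks; same fuel guard.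
def kodujKsB : Nat → Int → List Int
  | 0, _ => []
  | fuel + 1, n =>
    if n == 1 then []
    else
      let k := PySem.Int.floordiv n 2
      k :: kodujKsB fuel k

def KodujWyw_alt (n : Int) (wyw : List Int) : String :=
  let ks := kodujKsB n.toNat n
  String.ofList (List.replicate (ks.countP (fun k => PySem.Int.mod k 2 != 0)) 'B'
          ++ List.replicate (ks.countP (fun k => PySem.Int.mod k 2 == 0)) 'A')

-- ===== PRECONDITION & SPEC =====
-- Python A raises (RecursionError) for every n ≤ 0, and raises IndexError on empty
-- wyw whenever n ≠ 1 (wyw[0] += 1); Pre_ excludes exactly those inputs.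
def Pre_KodujWyw (n : Int) (wyw : List Int) : Prop := 1 ≤ n ∧ (n = 1 ∨ wyw ≠ [])
instance (n : Int) (wyw : List Int) : Decidable (Pre_KodujWyw n wyw) := by unfold Pre_KodujWyw; infer_instance
def pvWitness_KodujWyw : Int × List Int := (6, [0])

def Spec_KodujWyw (n : Int) (wyw : List Int) (out : String) : Prop := out = KodujWyw_alt n wyw
instance (n : Int) (wyw : List Int) (out : String) : Decidable (Spec_KodujWyw n wyw out) := by unfold Spec_KodujWyw; infer_instance

-- ===== CLAIM (what is proved, stated in full; the proofs are below) =====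
def Claim_equal_KodujWyw : Prop := ∀ (n : Int) (wyw : List Int), Dom_KodujWyw n wyw → Pre_KodujWyw n wyw → Spec_KodujWyw n wyw (KodujWyw n wyw)

-- ===== LEMMAS AND PROOFS =====

-- The recursion's output is exactly 'B' repeated (#odd halvings) followed by
-- 'A' repeated (#even halvings), for every fuel and every n.
theorem kodujRecA_eq (fuel : Nat) : ∀ (n : Int),
    kodujRecA fuel n =
      String.ofList (List.replicate ((kodujKsB fuel n).countP (fun k => PySem.Int.mod k 2 != 0)) 'B'
              ++ List.replicate ((kodujKsB fuel n).countP (fun k => PySem.Int.mod k 2 == 0)) 'A') := by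
  induction fuel with
  | zero => intro n; simp [kodujRecA, kodujKsB]
  | succ f ih =>
    intro n
    by_cases h : n = 1
    · simp [kodujRecA, kodujKsB, h]
    · simp only [kodujRecA, kodujKsB, beq_iff_eq, h, if_false, List.countP_cons, ih]
      by_cases hk : ((n.fdiv 2).fmod 2 = 0)
      · simp [hk, PySem.Int.mod, PySem.Int.floordiv, String.ofList_append,
              List.replicate_succ', String.append_assoc]
      · simp [hk, PySem.Int.mod, PySem.Int.floordiv, String.ofList_append,
              List.replicate_succ,
              show ∀ l : List Char, String.ofList ('B' :: l) = "B" ++ String.ofList l from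
                fun l => by rw [← List.singleton_append, String.ofList_append]]

-- ===== VERDICT (by name: the statement is the Claim_ definition above) =====
theorem KodujWyw_spec : Claim_equal_KodujWyw := by
  intro n wyw _ _
  show KodujWyw n wyw = KodujWyw_alt n wyw
  simp [KodujWyw, KodujWyw_alt, kodujRecA_eq]
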